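-- pv_equiv track=rewrite | github.com/DEOWL-kan/ai-image-trust-scanner | scripts/day14_evaluate_expansion.py | scene_label_counts
-- ===== SOURCE A (Python) =====
-- from collections import Counter, defaultdict
-- from typing import Any, Iterable
--
-- def scene_label_counts(rows: list[dict[str, Any]]) -> list[dict[str, str]]:
--     counts: dict[tuple[str, str], int] = defaultdict(int)
--     for row in rows:
--         counts[(str(row.get("label", "")), str(row.get("scene_type", "")))] += 1
--     return [
--         {"label": label, "scene_type": scene, "count": str(count)}
--         for (label, scene), count in sorted(counts.items())
--     ]
-- ===== SOURCE B (Python) =====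
-- from itertools import groupby
--
-- def scene_label_counts(rows):
--     keys = [(str(row.get("label", "")), str(row.get("scene_type", ""))) for row in rows]
--     keys.sort()
--     return [
--         {"label": k[0], "scene_type": k[1], "count": str(sum(1 for _ in g))}
--         for k, g in groupby(keys)
--     ]
-- ===== Notes on version B (the rewrite author's own statement) =====
-- stated objective: alternative
-- what changed: B builds the flat list of (label, scene_type) keys, sorts the whole list, and emits one entry per run via itertools.groupby run-length counting, instead of A's hash-counting into a defaultdict followed by sorting the distinct keys.
import Mathlib
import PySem

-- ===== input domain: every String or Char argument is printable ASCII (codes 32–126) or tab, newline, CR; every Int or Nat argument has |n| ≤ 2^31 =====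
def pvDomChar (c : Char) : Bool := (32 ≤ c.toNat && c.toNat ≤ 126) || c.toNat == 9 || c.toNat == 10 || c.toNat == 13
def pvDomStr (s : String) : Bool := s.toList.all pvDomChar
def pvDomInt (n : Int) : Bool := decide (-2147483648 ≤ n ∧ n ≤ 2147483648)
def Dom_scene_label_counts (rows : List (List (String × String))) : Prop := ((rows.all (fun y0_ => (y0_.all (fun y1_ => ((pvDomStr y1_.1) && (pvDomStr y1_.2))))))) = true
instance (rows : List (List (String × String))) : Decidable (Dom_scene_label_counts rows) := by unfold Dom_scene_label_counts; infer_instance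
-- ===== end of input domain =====

-- B replaces A's hash-count-then-sort-distinct-keys by sort-all-keys-then-run-length-group (alternative algorithm, same result).

-- ===== PORT A =====
-- sorted(counts.items()) compares Python tuples ((label, scene), count) lexicographically;
-- toLex-nested keys give exactly that lexicographic order.
def scene_label_counts (rows : List (List (String × String))) : List (List (String × String)) :=
  (PySem.List.sorted
      (rows.foldl
        (fun d row =>
          d.modify ((PySem.Dict.mk row).getD "label" "", (PySem.Dict.mk row).getD "scene_type" "") 0 (· + 1))
        PySem.Dict.empty).items
      (fun p => (toLex ((toLex p.1 : Lex (String × String)), p.2) : Lex (Lex (String × String) × Int)))).map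
    (fun p => [("label", p.1.1), ("scene_type", p.1.2), ("count", PySem.Int.toStr p.2)])

-- ===== PORT B =====
-- itertools.groupby over the sorted key list: one entry per maximal run of equal keys,
-- with the run's length as the count.
def pvGroupRuns : List (String × String) → List ((String × String) × Int)
  | [] => []
  | k :: rest =>
      (k, ((rest.takeWhile (· == k)).length : Int) + 1) :: pvGroupRuns (rest.dropWhile (· == k))
  termination_by l => l.length
  decreasing_by
    simp only [List.length_cons]
    exact Nat.lt_succ_of_le (List.length_dropWhile_le _ _)

def scene_label_counts_alt (rows : List (List (String × String))) : List (List (String × String)) :=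
  (pvGroupRuns (PySem.List.sorted
      (rows.map (fun row => ((PySem.Dict.mk row).getD "label" "", (PySem.Dict.mk row).getD "scene_type" "")))
      (fun j => (toLex j : Lex (String × String))))).map
    (fun p => [("label", p.1.1), ("scene_type", p.1.2), ("count", PySem.Int.toStr p.2)])

-- ===== PRECONDITION & SPEC =====
def Spec_scene_label_counts (rows : List (List (String × String))) (out : List (List (String × String))) : Prop := out = scene_label_counts_alt rows
instance (rows : List (List (String × String))) (out : List (List (String × String))) : Decidable (Spec_scene_label_counts rows out) := by unfold Spec_scene_label_counts; infer_instance

-- ===== CLAIM (what is proved, stated in full; the proofs are below) =====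
def Claim_equal_scene_label_counts : Prop := ∀ (rows : List (List (String × String))), Dom_scene_label_counts rows → Spec_scene_label_counts rows (scene_label_counts rows)

-- ===== LEMMAS AND PROOFS =====

-- head of dropWhile fails the predicate
theorem pv_head_dropWhile {α : Type} (p : α → Bool) :
    ∀ (l : List α) {x : α} {xs : List α}, l.dropWhile p = x :: xs → p x = false
  | [], x, xs => by intro h; simp [List.dropWhile] at h
  | a :: l, x, xs => by
      intro h
      rw [List.dropWhile_cons] at h
      split at h
      · exact pv_head_dropWhile p l h
      · cases h; simpa using ‹¬ p a = true›

theorem pv_foldl_add_cons {α : Type} [BEq α] [LawfulBEq α] :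
    ∀ (xs : List α) (s : List α) (k : α), k ∉ xs →
      xs.foldl PySem.Set.add (k :: s) = k :: xs.foldl PySem.Set.add s
  | [], s, k, _ => rfl
  | x :: xs, s, k, hk => by
      have hxk : x ≠ k := fun he => hk (he ▸ List.mem_cons_self)
      have hstep : PySem.Set.add (k :: s) x = k :: PySem.Set.add s x := by
        rw [PySem.Set.add_eq_ite, PySem.Set.add_eq_ite]
        by_cases hx : x ∈ s
        · simp [hx]
        · have : x ∉ k :: s := by simp [hxk, hx]
          simp [hx, this]
      rw [List.foldl_cons, List.foldl_cons, hstep]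
      exact pv_foldl_add_cons xs (PySem.Set.add s x) k (fun h => hk (List.mem_cons_of_mem _ h))

theorem pv_foldl_add_replicate {α : Type} [BEq α] [LawfulBEq α] (n : Nat) (k : α) (s : PySem.Set α)
    (hs : k ∈ s) : (List.replicate n k).foldl PySem.Set.add s = s := by
  induction n with
  | zero => rfl
  | succ n ih => rw [List.replicate_succ, List.foldl_cons, PySem.Set.add_of_mem hs]; exact ih

-- splitting a ≤-sorted list at its head's run
theorem pv_run_split (k : String × String) (rest : List (String × String))
    (h : (k :: rest).Pairwise (fun a b => (toLex a : Lex (String × String)) ≤ toLex b)) :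
    rest = List.replicate (rest.takeWhile (· == k)).length k ++ rest.dropWhile (· == k)
    ∧ k ∉ rest.dropWhile (· == k)
    ∧ (rest.dropWhile (· == k)).Pairwise (fun a b => (toLex a : Lex (String × String)) ≤ toLex b) := by
  obtain ⟨hk_all, hrest_pw⟩ := List.pairwise_cons.mp h
  have ht : rest.takeWhile (· == k) = List.replicate (rest.takeWhile (· == k)).length k :=
    List.eq_replicate_iff.mpr ⟨rfl, fun b hb => by
      simpa using List.mem_takeWhile_imp hb⟩
  have hsplit : rest = List.replicate (rest.takeWhile (· == k)).length k ++ rest.dropWhile (· == k) := by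
    have := List.takeWhile_append_dropWhile (p := (· == k)) (l := rest)
    rw [ht] at this
    exact this.symm
  have hd_pw : (rest.dropWhile (· == k)).Pairwise
      (fun a b => (toLex a : Lex (String × String)) ≤ toLex b) := by
    have := hsplit ▸ hrest_pw
    exact (List.pairwise_append.mp this).2.1
  refine ⟨hsplit, ?_, hd_pw⟩
  intro hk
  cases hdd : rest.dropWhile (· == k) with
  | nil => rw [hdd] at hk; simp at hk
  | cons x xs =>
    have hxk : x ≠ k := by
      have := pv_head_dropWhile (· == k) rest hdd
      simpa using this
    rw [hdd] at hk
    rcases List.mem_cons.mp hk with he | hk'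
    · exact hxk he.symm
    · have h1 : (toLex x : Lex (String × String)) ≤ toLex k := by
        rw [hdd] at hd_pw
        exact (List.pairwise_cons.mp hd_pw).1 k hk'
      have h2 : (toLex k : Lex (String × String)) ≤ toLex x := by
        apply hk_all
        rw [hsplit, hdd]
        exact List.mem_append_right _ List.mem_cons_self
      exact hxk (toLex.injective (le_antisymm h1 h2))

-- run-length grouping of a ≤-sorted list = distinct keys (first occurrences) with their counts
theorem pvGroupRuns_eq (l : List (String × String))
    (h : l.Pairwise (fun a b => (toLex a : Lex (String × String)) ≤ toLex b)) :
    pvGroupRuns l = (PySem.Set.ofList l).map (fun j => (j, (l.count j : Int))) := by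
  induction l using pvGroupRuns.induct with
  | case1 => simp [pvGroupRuns, PySem.Set.ofList]
  | case2 k rest ih =>
    obtain ⟨hsplit, hnot, hd_pw⟩ := pv_run_split k rest h
    have hof : PySem.Set.ofList (k :: rest) = k :: PySem.Set.ofList (rest.dropWhile (· == k)) := by
      rw [PySem.Set.ofList_eq_foldl, List.foldl_cons]
      have h0 : PySem.Set.add ([] : PySem.Set (String × String)) k = [k] := by
        simp
      rw [h0]
      conv_lhs => rw [hsplit]
      rw [List.foldl_append,
        pv_foldl_add_replicate _ _ _ List.mem_cons_self,
        pv_foldl_add_cons _ [] k hnot, ← PySem.Set.ofList_eq_foldl]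
    have hcnt : (k :: rest).count k = (rest.takeWhile (· == k)).length + 1 := by
      rw [List.count_cons_self]
      conv_lhs => rw [hsplit]
      rw [List.count_append, List.count_replicate_self, List.count_eq_zero.mpr hnot]
    rw [pvGroupRuns, hof, List.map_cons]
    congr 1
    · have : ((k :: rest).count k : Int) = ((rest.takeWhile (· == k)).length : Int) + 1 := by
        rw [hcnt]; push_cast; ring
      rw [this]
    · rw [ih hd_pw]
      apply List.map_congr_left
      intro j hj
      have hjd : j ∈ rest.dropWhile (· == k) := (PySem.Set.mem_ofList _ _).mp hj
      have hjk : j ≠ k := fun he => hnot (he ▸ hjd)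
      have : (k :: rest).count j = (rest.dropWhile (· == k)).count j := by
        rw [List.count_cons_of_ne (Ne.symm hjk)]
        conv_lhs => rw [hsplit]
        simp [List.count_append, List.count_replicate, Ne.symm hjk]
      rw [this]

-- the groups of a ≤-sorted list are strictly increasing in their key
theorem pvGroupRuns_pairwise (l : List (String × String))
    (h : l.Pairwise (fun a b => (toLex a : Lex (String × String)) ≤ toLex b)) :
    (pvGroupRuns l).Pairwise (fun p q =>
      (toLex ((toLex p.1 : Lex (String × String)), p.2) : Lex (Lex (String × String) × Int))
        < toLex (toLex q.1, q.2)) := by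
  induction l using pvGroupRuns.induct with
  | case1 => simp [pvGroupRuns]
  | case2 k rest ih =>
    obtain ⟨hsplit, hnot, hd_pw⟩ := pv_run_split k rest h
    obtain ⟨hk_all, _⟩ := List.pairwise_cons.mp h
    rw [pvGroupRuns]
    refine List.pairwise_cons.mpr ⟨?_, ih hd_pw⟩
    intro q hq
    rw [pvGroupRuns_eq _ hd_pw] at hq
    obtain ⟨j, hj, rfl⟩ := List.mem_map.mp hq
    have hjd : j ∈ rest.dropWhile (· == k) := (PySem.Set.mem_ofList _ _).mp hj
    have hjk : j ≠ k := fun he => hnot (he ▸ hjd)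
    have hle : (toLex k : Lex (String × String)) ≤ toLex j := by
      apply hk_all
      rw [hsplit]
      exact List.mem_append_right _ hjd
    have hlt : (toLex k : Lex (String × String)) < toLex j :=
      lt_of_le_of_ne hle (fun he => hjk (toLex.injective he).symm)
    exact Prod.Lex.lt_iff.mpr (Or.inl hlt)

-- a Python-style counting loop keyed by e is Counter of the mapped list
theorem pv_foldl_modify_map {α κ : Type} [BEq κ] (l : List α) (e : α → κ) :
    l.foldl (fun d x => PySem.Dict.modify d (e x) 0 (· + 1)) PySem.Dict.empty
      = PySem.Dict.counter (l.map e) := by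
  rw [PySem.Dict.counter_eq_foldl, List.foldl_map]

-- central lemma: A's sort of the counter items = B's run-length grouping of the sorted keys
theorem pv_sorted_items (keys : List (String × String)) :
    PySem.List.sorted ((PySem.Set.ofList keys).map (fun j => (j, (keys.count j : Int))))
        (fun p => (toLex ((toLex p.1 : Lex (String × String)), p.2) : Lex (Lex (String × String) × Int)))
      = pvGroupRuns (PySem.List.sorted keys (fun j => (toLex j : Lex (String × String)))) := by
  have hpw := PySem.List.sorted_pairwise keys (fun j => (toLex j : Lex (String × String)))
  apply PySem.List.sorted_eq_of_perm_of_pairwise_lt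
  · rw [pvGroupRuns_eq _ hpw]
    have hmap : (PySem.Set.ofList (PySem.List.sorted keys (fun j => (toLex j : Lex (String × String))))).map
          (fun j => (j, ((PySem.List.sorted keys (fun j => (toLex j : Lex (String × String)))).count j : Int)))
        = (PySem.Set.ofList (PySem.List.sorted keys (fun j => (toLex j : Lex (String × String))))).map
          (fun j => (j, (keys.count j : Int))) := by
      apply List.map_congr_left
      intro j _
      rw [List.Perm.count_eq (PySem.List.sorted_perm keys _ false)]
    rw [hmap]
    apply List.Perm.map
    apply (List.perm_ext_iff_of_nodup (PySem.Set.nodup_ofList _) (PySem.Set.nodup_ofList _)).mpr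
    intro a
    simp [PySem.Set.mem_ofList, PySem.List.mem_sorted]
  · exact pvGroupRuns_pairwise _ hpw

-- ===== VERDICT (by name: the statement is the Claim_ definition above) =====
theorem scene_label_counts_spec : Claim_equal_scene_label_counts := by
  intro rows _
  show scene_label_counts rows = scene_label_counts_alt rows
  unfold scene_label_counts scene_label_counts_alt
  rw [pv_foldl_modify_map rows
      (fun row => ((PySem.Dict.mk row).getD "label" "", (PySem.Dict.mk row).getD "scene_type" "")),
    PySem.Dict.items_counter, pv_sorted_items]
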